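-- pv_equiv track=rewrite | github.com/kasing213/facebook-tiktok-automation | apply_comprehensive_rls.py | _split_migration_sql
-- ===== SOURCE A (Python) =====
-- from typing import Dict, List, Tuple
--
-- def _split_migration_sql(sql: str) -> List[Tuple[str, str]]:
--     """Split migration SQL into logical sections for better error reporting"""
--     sections = []
--     current_section = ""
--     current_name = "Initial Setup"
--
--     for line in sql.splitlines():
--         if line.strip().startswith('-- SECTION'):
--             if current_section.strip():  # Only add non-empty sections
--                 sections.append((current_name, current_section))
--             current_name = line.strip()[2:].replace('SECTION ', '').replace(':', '').strip()  # Clean section name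
--             current_section = ""
--         else:
--             current_section += line + "\n"
--
--     # Add final section if not empty
--     if current_section.strip():
--         sections.append((current_name, current_section))
--
--     # Filter out empty sections
--     sections = [(name, content) for name, content in sections if content.strip()]
--
--     return sections
-- ===== SOURCE B (Python) =====
-- from typing import List, Tuple
--
--
-- def _build(name: str, lines: List[str]) -> List[Tuple[str, str]]:
--     """Recursive decomposition: split at the first marker line."""
--     i = 0
--     while i < len(lines) and not lines[i].strip().startswith('-- SECTION'):
--         i += 1
--     content = ''.join(l + '\n' for l in lines[:i])
--     head = [(name, content)] if content.strip() else []
--     if i == len(lines):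
--         return head
--     next_name = lines[i].strip()[2:].replace('SECTION ', '').replace(':', '').strip()
--     return head + _build(next_name, lines[i + 1:])
--
--
-- def _split_migration_sql(sql: str) -> List[Tuple[str, str]]:
--     return _build("Initial Setup", sql.splitlines())
-- ===== Notes on version B (the rewrite author's own statement) =====
-- stated objective: alternative
-- what changed: A's flush-on-marker loop with a mutable (sections, current_section, current_name) accumulator is replaced by a recursion that splits the line list at the first SECTION-marker line, joins the prefix into one section and recurses on the remainder with the cleaned marker as the next name.
import Mathlib
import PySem

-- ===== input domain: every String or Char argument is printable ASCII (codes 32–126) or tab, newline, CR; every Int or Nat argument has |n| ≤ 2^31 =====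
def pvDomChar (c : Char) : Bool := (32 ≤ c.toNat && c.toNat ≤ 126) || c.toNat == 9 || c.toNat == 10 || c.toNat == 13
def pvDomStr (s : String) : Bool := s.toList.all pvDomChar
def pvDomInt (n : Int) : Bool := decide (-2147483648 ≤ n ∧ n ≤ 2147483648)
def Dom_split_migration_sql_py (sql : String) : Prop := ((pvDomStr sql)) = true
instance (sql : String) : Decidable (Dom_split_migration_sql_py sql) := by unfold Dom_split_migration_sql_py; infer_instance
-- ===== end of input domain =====

-- B replaces A's flush-on-marker accumulator loop by a recursive decomposition that
-- splits the line list at the first marker line (objective: alternative; same cost).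

-- line.strip().startswith('-- SECTION')
def pvMarker (line : List Char) : Bool :=
  PySem.Chars.startswith (PySem.Chars.strip line) "-- SECTION".toList

-- line.strip()[2:].replace('SECTION ', '').replace(':', '').strip()
def pvClean (line : List Char) : List Char :=
  PySem.Chars.strip
    (PySem.Chars.replace
      (PySem.Chars.replace (PySem.Chars.slice (PySem.Chars.strip line) (some 2) none)
        "SECTION ".toList "".toList)
      ":".toList "".toList)

-- ===== PORT A =====
-- fold over splitlines with state (sections, current_section, current_name)
def split_migration_sql_py (sql : String) : List (String × String) :=
  let st :=
    (PySem.Chars.splitlines sql.toList).foldl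
      (fun (st : List (List Char × List Char) × List Char × List Char) line =>
        let (sections, current_section, current_name) := st
        if pvMarker line then
          ((if !(PySem.Chars.strip current_section).isEmpty then
              sections ++ [(current_name, current_section)]
            else sections),
           [], pvClean line)
        else
          (sections, current_section ++ line ++ ['\n'], current_name))
      ([], [], "Initial Setup".toList)
  let sections :=
    if !(PySem.Chars.strip st.2.1).isEmpty then st.1 ++ [(st.2.2, st.2.1)] else st.1
  (sections.filter (fun p => !(PySem.Chars.strip p.2).isEmpty)).map
    (fun p => (String.ofList p.1, String.ofList p.2))

-- ===== PORT B =====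
-- _build: take lines up to the first marker, emit that section (if non-blank),
-- recurse on the rest with the cleaned marker line as the next name
def pvBuild (name : List Char) (lines : List (List Char)) :
    List (List Char × List Char) :=
  let pre := lines.takeWhile (fun l => !pvMarker l)
  let content := PySem.Chars.join [] (pre.map (fun l => l ++ ['\n']))
  let head :=
    if !(PySem.Chars.strip content).isEmpty then [(name, content)] else []
  match h : lines.dropWhile (fun l => !pvMarker l) with
  | [] => head
  | m :: rest => head ++ pvBuild (pvClean m) rest
termination_by lines.length
decreasing_by
  have h1 : (m :: rest).length ≤ lines.length := by
    rw [← h]; exact (List.dropWhile_sublist _).length_le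
  simp at h1; omega

def split_migration_sql_py_alt (sql : String) : List (String × String) :=
  (pvBuild "Initial Setup".toList (PySem.Chars.splitlines sql.toList)).map
    (fun p => (String.ofList p.1, String.ofList p.2))

-- ===== PRECONDITION & SPEC =====
def Spec_split_migration_sql_py (sql : String) (out : List (String × String)) : Prop := out = split_migration_sql_py_alt sql
instance (sql : String) (out : List (String × String)) : Decidable (Spec_split_migration_sql_py sql out) := by unfold Spec_split_migration_sql_py; infer_instance

-- ===== CLAIM (what is proved, stated in full; the proofs are below) =====
def Claim_equal_split_migration_sql_py : Prop := ∀ (sql : String), Dom_split_migration_sql_py sql → Spec_split_migration_sql_py sql (split_migration_sql_py sql)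

-- ===== LEMMAS AND PROOFS =====

-- A's loop step and finalisation, as standalone functions (proof-side only)
def pvStep (st : List (List Char × List Char) × List Char × List Char)
    (line : List Char) : List (List Char × List Char) × List Char × List Char :=
  let (sections, current_section, current_name) := st
  if pvMarker line then
    ((if !(PySem.Chars.strip current_section).isEmpty then
        sections ++ [(current_name, current_section)]
      else sections),
     [], pvClean line)
  else
    (sections, current_section ++ line ++ ['\n'], current_name)

def pvP (p : List Char × List Char) : Bool := !(PySem.Chars.strip p.2).isEmpty

def pvFinal (st : List (List Char × List Char) × List Char × List Char) :
    List (List Char × List Char) :=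
  (if !(PySem.Chars.strip st.2.1).isEmpty then st.1 ++ [(st.2.2, st.2.1)] else st.1).filter pvP

-- B's recursion with a pending-prefix accumulator (proof-side only)
def pvB' (cur name : List Char) (lines : List (List Char)) :
    List (List Char × List Char) :=
  match lines with
  | [] => if !(PySem.Chars.strip cur).isEmpty then [(name, cur)] else []
  | l :: rest =>
    if pvMarker l then
      (if !(PySem.Chars.strip cur).isEmpty then [(name, cur)] else []) ++
        pvB' [] (pvClean l) rest
    else pvB' (cur ++ l ++ ['\n']) name rest

-- head/tail of pvBuild's body, factored for rewriting
def pvHead (cur name : List Char) (lines : List (List Char)) :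
    List (List Char × List Char) :=
  let content := cur ++ PySem.Chars.join []
    ((lines.takeWhile (fun l => !pvMarker l)).map (fun l => l ++ ['\n']))
  if !(PySem.Chars.strip content).isEmpty then [(name, content)] else []

def pvTail (lines : List (List Char)) : List (List Char × List Char) :=
  match lines.dropWhile (fun l => !pvMarker l) with
  | [] => []
  | m :: rest => pvBuild (pvClean m) rest

theorem pvJoin_nil_cons (x : List Char) (xs : List (List Char)) :
    PySem.Chars.join [] (x :: xs) = x ++ PySem.Chars.join [] xs := by
  cases xs <;> simp [PySem.Chars.join, List.intercalate, List.intersperse]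

theorem pvBuild_eq (name : List Char) (lines : List (List Char)) :
    pvBuild name lines = pvHead [] name lines ++ pvTail lines := by
  rw [pvBuild]; unfold pvHead pvTail
  cases hd : lines.dropWhile (fun l => !pvMarker l) <;> simp

theorem pvB'_eq (lines : List (List Char)) : ∀ (cur name : List Char),
    pvB' cur name lines = pvHead cur name lines ++ pvTail lines := by
  induction lines with
  | nil =>
    intro cur name
    simp [pvB', pvHead, pvTail, PySem.Chars.join, List.intercalate]
  | cons l rest ih =>
    intro cur name
    by_cases hm : pvMarker l
    · have hb : pvB' [] (pvClean l) rest = pvBuild (pvClean l) rest := by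
        rw [ih, ← pvBuild_eq]
      rw [pvB']
      simp only [hm, hb]
      unfold pvHead pvTail
      simp [List.takeWhile, List.dropWhile, hm]
    · rw [pvB']
      simp only [hm]
      rw [if_neg (by simp [hm]), ih]
      unfold pvHead pvTail
      simp [List.takeWhile, List.dropWhile, hm, pvJoin_nil_cons]

theorem pvFold_inv (lines : List (List Char)) :
    ∀ (secs : List (List Char × List Char)) (cur name : List Char),
    pvFinal (lines.foldl pvStep (secs, cur, name)) =
      secs.filter pvP ++ pvB' cur name lines := by
  induction lines with
  | nil =>
    intro secs cur name
    by_cases hc : (PySem.Chars.strip cur).isEmpty <;>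
      simp [pvFinal, pvB', hc, List.filter_append, pvP]
  | cons l rest ih =>
    intro secs cur name
    by_cases hm : pvMarker l
    · have hstep : pvStep (secs, cur, name) l =
          ((if !(PySem.Chars.strip cur).isEmpty then secs ++ [(name, cur)] else secs),
           [], pvClean l) := by simp [pvStep, hm]
      rw [List.foldl_cons, hstep, ih]
      by_cases hc : (PySem.Chars.strip cur).isEmpty <;>
        simp [pvB', hm, hc, List.filter_append, pvP]
    · have hstep : pvStep (secs, cur, name) l =
          (secs, cur ++ l ++ ['\n'], name) := by simp [pvStep, hm]
      rw [List.foldl_cons, hstep, ih]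
      simp [pvB', hm]

theorem pvPortA_eq (sql : String) :
    split_migration_sql_py sql =
      (pvFinal ((PySem.Chars.splitlines sql.toList).foldl pvStep
        ([], [], "Initial Setup".toList))).map
        (fun p => (String.ofList p.1, String.ofList p.2)) := by
  rfl

-- ===== VERDICT (by name: the statement is the Claim_ definition above) =====
theorem split_migration_sql_py_spec : Claim_equal_split_migration_sql_py := by
  intro sql _
  unfold Spec_split_migration_sql_py split_migration_sql_py_alt
  rw [pvPortA_eq, pvFold_inv, pvB'_eq, ← pvBuild_eq]
  simp
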